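-- pv_equiv track=rewrite | github.com/Hulyamr13/hackerrank | Count Solutions.py | countSolutions
-- ===== SOURCE A (Python) =====
-- def countSolutions(a, b, c, d):
--     # Write your code here
--     ans = {}
--     t = 0
--     for i in range(1, c + 1):
--         gg = i * (i - a)
--         if gg in ans:
--             ans[gg] += 1
--         else:
--             ans[gg] = 1
--     for i in range(1, d + 1):
--         gg = i * (b - i)
--         if gg in ans:
--             t += ans[gg]
--     return t
-- ===== SOURCE B (Python) =====
-- def countSolutions(a, b, c, d):
--     xs = sorted(i * (i - a) for i in range(1, c + 1))
--     ys = sorted(j * (b - j) for j in range(1, d + 1))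
--     t = 0
--     while xs and ys:
--         x = xs[-1]
--         y = ys[-1]
--         if x > y:
--             xs.pop()
--         elif y > x:
--             ys.pop()
--         else:
--             m = 0
--             while xs and xs[-1] == x:
--                 xs.pop()
--                 m += 1
--             n = 0
--             while ys and ys[-1] == x:
--                 ys.pop()
--                 n += 1
--             t += m * n
--     return t
-- ===== Notes on version B (the rewrite author's own statement) =====
-- stated objective: alternative
-- what changed: Replaces the hash-counter build-then-probe with sorting both value lists and a two-stack merge that multiplies the lengths of equal runs, keeping only a running total (no dict).
import Mathlib
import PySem

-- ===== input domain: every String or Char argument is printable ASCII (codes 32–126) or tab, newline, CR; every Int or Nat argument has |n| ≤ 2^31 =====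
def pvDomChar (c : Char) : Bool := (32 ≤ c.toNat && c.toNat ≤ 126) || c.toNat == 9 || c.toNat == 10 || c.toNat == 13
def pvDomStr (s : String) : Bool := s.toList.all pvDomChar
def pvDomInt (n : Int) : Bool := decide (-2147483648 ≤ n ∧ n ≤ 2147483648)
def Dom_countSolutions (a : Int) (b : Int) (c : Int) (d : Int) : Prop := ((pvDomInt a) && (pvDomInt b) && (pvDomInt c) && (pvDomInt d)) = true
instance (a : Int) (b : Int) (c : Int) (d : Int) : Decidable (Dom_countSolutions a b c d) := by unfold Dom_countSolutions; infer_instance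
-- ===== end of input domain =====

-- B replaces A's hash-counter build-then-probe with sorting both value lists and a two-stack merge of equal runs; alternative algorithm, comparable cost.


-- ===== PORT A =====
def countSolutions (a : Int) (b : Int) (c : Int) (d : Int) : Int :=
  let ans : PySem.Dict Int Int :=
    (PySem.List.pyRange 1 (c + 1) 1).foldl (fun ans i =>
      let gg := i * (i - a)
      if ans.contains gg then ans.insert gg (ans.getD gg 0 + 1)
      else ans.insert gg 1) PySem.Dict.empty
  (PySem.List.pyRange 1 (d + 1) 1).foldl (fun t i =>
      let gg := i * (b - i)
      if ans.contains gg then t + ans.getD gg 0 else t) 0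

-- ===== PORT B =====
-- B pops from the END of its Python lists (stack discipline); the port models each
-- stack as the REVERSED sorted list, so Python's xs[-1] / xs.pop() is the head here.
def popRunB (v : Int) : List Int → Int → Int × List Int
  | [], m => (m, [])
  | x :: rest, m => if x == v then popRunB v rest (m + 1) else (m, x :: rest)

theorem popRunB_len (v : Int) : ∀ (l : List Int) (m : Int), (popRunB v l m).2.length ≤ l.length := by
  intro l
  induction l with
  | nil => intro m; simp [popRunB]
  | cons x rest ih =>
    intro m
    by_cases h : x == v
    · simp only [popRunB, h, if_pos]
      exact le_trans (ih (m + 1)) (by simp)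
    · simp [popRunB, h]

def mergeCountB : List Int → List Int → Int → Int
  | [], _, t => t
  | _ :: _, [], t => t
  | x :: u, y :: v, t =>
    if x > y then mergeCountB u (y :: v) t
    else if y > x then mergeCountB (x :: u) v t
    else
      let p := popRunB x (x :: u) 0
      let q := popRunB x (y :: v) 0
      mergeCountB p.2 q.2 (t + p.1 * q.1)
termination_by u v _ => u.length + v.length
decreasing_by
  · simp
  · simp
  · have h1 : (popRunB x (x :: u) 0).2.length ≤ u.length := by
      simpa [popRunB] using popRunB_len x u 1
    have h2 : (popRunB x (y :: v) 0).2.length ≤ v.length := by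
      have hxy : x = y := le_antisymm (by omega) (by omega)
      simpa [popRunB, hxy] using popRunB_len y v 1
    simp only [List.length_cons]
    omega


def countSolutions_alt (a : Int) (b : Int) (c : Int) (d : Int) : Int :=
  let xs := PySem.List.sorted ((PySem.List.pyRange 1 (c + 1) 1).map (fun i => i * (i - a))) id
  let ys := PySem.List.sorted ((PySem.List.pyRange 1 (d + 1) 1).map (fun j => j * (b - j))) id
  mergeCountB xs.reverse ys.reverse 0

-- ===== PRECONDITION & SPEC =====
def Spec_countSolutions (a : Int) (b : Int) (c : Int) (d : Int) (out : Int) : Prop := out = countSolutions_alt a b c d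
instance (a : Int) (b : Int) (c : Int) (d : Int) (out : Int) : Decidable (Spec_countSolutions a b c d out) := by unfold Spec_countSolutions; infer_instance

-- ===== CLAIM (what is proved, stated in full; the proofs are below) =====
def Claim_equal_countSolutions : Prop := ∀ (a : Int) (b : Int) (c : Int) (d : Int), Dom_countSolutions a b c d → Spec_countSolutions a b c d (countSolutions a b c d)

-- ===== LEMMAS AND PROOFS =====

def matchSum (xs ys : List Int) : Int := (ys.map (fun y => (xs.count y : Int))).sum

theorem popRunB_spec (v : Int) : ∀ (l : List Int) (m : Int),
    ∃ (k : Nat) (r : List Int), popRunB v l m = (m + (k : Int), r) ∧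
      l = List.replicate k v ++ r ∧ ∀ h : r ≠ [], r.head h ≠ v := by
  intro l
  induction l with
  | nil =>
    intro m
    exact ⟨0, [], by simp [popRunB], by simp, by simp⟩
  | cons x rest ih =>
    intro m
    by_cases h : x = v
    · obtain ⟨k, r, h1, h2, h3⟩ := ih (m + 1)
      refine ⟨k + 1, r, ?_, ?_, h3⟩
      · simp only [popRunB, h, beq_self_eq_true, if_pos]
        rw [h1]; congr 1; push_cast; ring
      · subst h; simp [List.replicate_succ, h2]
    · refine ⟨0, x :: rest, ?_, by simp, ?_⟩
      · simp [popRunB, h]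
      · intro _; simpa using h

theorem desc_head_ge (x : Int) (u : List Int) (h : (x :: u).Pairwise (· ≥ ·)) :
    ∀ z ∈ x :: u, z ≤ x := by
  intro z hz
  rcases List.mem_cons.mp hz with rfl | hz'
  · exact le_refl z
  · exact (List.pairwise_cons.mp h).1 z hz'

theorem run_split (x : Int) (u : List Int) (hu : (x :: u).Pairwise (· ≥ ·)) :
    ∃ (k : Nat) (r : List Int), popRunB x (x :: u) 0 = ((k : Int), r) ∧
      x :: u = List.replicate k x ++ r ∧ 1 ≤ k ∧ (∀ z ∈ r, z < x) ∧
      r.Pairwise (· ≥ ·) ∧ r.length + k = u.length + 1 := by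
  obtain ⟨k, r, h1, h2, h3⟩ := popRunB_spec x (x :: u) 0
  have hrp : r.Pairwise (· ≥ ·) := (List.pairwise_append.mp (h2 ▸ hu)).2.1
  have hk : 1 ≤ k := by
    rcases k with _ | k
    · exfalso
      have hr : r = x :: u := by simpa using h2.symm
      subst hr
      exact h3 (by simp) (by simp)
    · omega
  have hlt : ∀ z ∈ r, z < x := by
    intro z hz
    have hhdlt : ∀ hr : r ≠ [], r.head hr < x := by
      intro hr
      have hle : r.head hr ≤ x :=
        desc_head_ge x u hu _ (h2 ▸ List.mem_append_right _ (List.head_mem hr))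
      exact lt_of_le_of_ne hle (h3 hr)
    match r, hz, hrp, hhdlt with
    | hd :: tl, hz, hrp, hhdlt =>
      have hhd : hd < x := by simpa using hhdlt (by simp)
      have hzle : z ≤ hd := desc_head_ge hd tl hrp z hz
      omega
  have hlen : r.length + k = u.length + 1 := by
    have := congrArg List.length h2
    simp [List.length_replicate] at this
    omega
  exact ⟨k, r, by simpa using h1, h2, hk, hlt, hrp, hlen⟩

theorem matchSum_nil_left (ys : List Int) : matchSum [] ys = 0 := by simp [matchSum]

theorem matchSum_cons_right (xs : List Int) (y : Int) (ys : List Int) :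
    matchSum xs (y :: ys) = (xs.count y : Int) + matchSum xs ys := by simp [matchSum]

theorem mergeCountB_eq (N : Nat) : ∀ (u v : List Int) (t : Int),
    u.length + v.length ≤ N → u.Pairwise (· ≥ ·) → v.Pairwise (· ≥ ·) →
    mergeCountB u v t = t + matchSum u v := by
  induction N with
  | zero =>
    intro u v t hlen _ _
    have hu : u = [] := by cases u <;> simp_all
    subst hu
    simp [mergeCountB, matchSum_nil_left]
  | succ N ih =>
    intro u v t hlen hu hv
    match u, v with
    | [], v => simp [mergeCountB, matchSum_nil_left]
    | x :: u, [] => simp [mergeCountB, matchSum]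
    | x :: u, y :: v =>
      rw [mergeCountB]
      by_cases hxy : x > y
      · rw [if_pos hxy]
        rw [ih u (y :: v) t (by simp at hlen ⊢; omega) (List.pairwise_cons.mp hu).2 hv]
        congr 1
        unfold matchSum
        apply congrArg
        apply List.map_congr_left
        intro z hz
        have hzle : z ≤ y := desc_head_ge y v hv z hz
        have h1 : ¬ z = x := by omega
        have h2 : ¬ x = z := by omega
        simp [h2]
      · rw [if_neg hxy]
        by_cases hyx : y > x
        · rw [if_pos hyx]
          rw [ih (x :: u) v t (by simp at hlen ⊢; omega) hu (List.pairwise_cons.mp hv).2]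
          congr 1
          rw [matchSum_cons_right]
          have : (x :: u).count y = 0 := by
            apply List.count_eq_zero_of_not_mem
            intro hmem
            have := desc_head_ge x u hu y hmem
            omega
          simp [this]
        · rw [if_neg hyx]
          have hxy' : x = y := le_antisymm (by omega) (by omega)
          subst hxy'
          obtain ⟨k, r, hpr, hdec, hk, hlt, hrp, hlen1⟩ := run_split x u hu
          obtain ⟨k', r', hpr', hdec', hk', hlt', hrp', hlen1'⟩ := run_split x v hv
          rw [hpr, hpr']
          simp only
          rw [ih r r' (t + (k : Int) * (k' : Int)) (by simp at hlen ⊢; omega) hrp hrp']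
          have hcount : (x :: u).count x = k := by
            rw [hdec, List.count_append, List.count_replicate]
            simp [List.count_eq_zero_of_not_mem (fun hm => lt_irrefl x (hlt x hm))]
          have hms : matchSum (x :: u) (x :: v) = (k : Int) * (k' : Int) + matchSum r r' := by
            rw [show x :: v = List.replicate k' x ++ r' from hdec']
            unfold matchSum
            rw [List.map_append, List.sum_append]
            congr 1
            · rw [List.map_replicate, List.sum_replicate, hcount]
              simp [mul_comm]
            · apply congrArg
              apply List.map_congr_left
              intro z hz
              rw [hdec, List.count_append, List.count_replicate]
              have h2 : ¬ x = z := by have := hlt' z hz; omega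
              simp [h2]
          rw [hms]; ring

-- A's first loop builds exactly the counter of the value list xs = map (i*(i-a)) range.
theorem buildA_eq_counter (a : Int) (c : Int) :
    (PySem.List.pyRange 1 (c + 1) 1).foldl (fun ans i =>
      let gg := i * (i - a)
      if ans.contains gg then ans.insert gg (ans.getD gg 0 + 1)
      else ans.insert gg 1) PySem.Dict.empty
    = PySem.Dict.counter ((PySem.List.pyRange 1 (c + 1) 1).map (fun i => i * (i - a))) := by
  rw [← PySem.Dict.foldl_insert_getD_add_one_eq_counter, List.foldl_map]
  apply PySem.List.foldl_congr_mem
  intro ans i _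
  by_cases h : ans.contains (i * (i - a))
  · simp [h]
  · have h' : ans.contains (i * (i - a)) = false := by simpa using h
    simp [h', PySem.Dict.getD_of_not_contains ans 0 h']

-- A computes matchSum of the two value lists
theorem countSolutions_eq_matchSum (a : Int) (b : Int) (c : Int) (d : Int) :
    countSolutions a b c d
      = matchSum ((PySem.List.pyRange 1 (c + 1) 1).map (fun i => i * (i - a)))
                 ((PySem.List.pyRange 1 (d + 1) 1).map (fun j => j * (b - j))) := by
  unfold countSolutions
  rw [buildA_eq_counter]
  rw [PySem.List.foldl_congr_mem _ _
      (fun t j => t + (((PySem.List.pyRange 1 (c + 1) 1).map (fun i => i * (i - a))).count (j * (b - j)) : Int)) 0 ?_]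
  · rw [PySem.List.foldl_add]
    simp [matchSum, List.map_map, Function.comp_def]
  · intro t j _
    by_cases h : (j * (b - j)) ∈ (PySem.List.pyRange 1 (c + 1) 1).map (fun i => i * (i - a))
    · simp [PySem.Dict.contains_counter, PySem.Dict.getD_counter, h]
    · simp [PySem.Dict.contains_counter, h, List.count_eq_zero_of_not_mem h]

-- ===== VERDICT (by name: the statement is the Claim_ definition above) =====
theorem countSolutions_spec : Claim_equal_countSolutions := by
  intro a b c d _
  unfold Spec_countSolutions countSolutions_alt
  simp only
  set Xs := (PySem.List.pyRange 1 (c + 1) 1).map (fun i => i * (i - a)) with hXs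
  set Ys := (PySem.List.pyRange 1 (d + 1) 1).map (fun j => j * (b - j)) with hYs
  have hpermX : (PySem.List.sorted Xs id).reverse.Perm Xs :=
    (List.reverse_perm _).trans (PySem.List.sorted_perm Xs id false)
  have hpermY : (PySem.List.sorted Ys id).reverse.Perm Ys :=
    (List.reverse_perm _).trans (PySem.List.sorted_perm Ys id false)
  have hpwX : (PySem.List.sorted Xs id).reverse.Pairwise (· ≥ ·) := by
    rw [List.pairwise_reverse]
    simpa using PySem.List.sorted_pairwise Xs id
  have hpwY : (PySem.List.sorted Ys id).reverse.Pairwise (· ≥ ·) := by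
    rw [List.pairwise_reverse]
    simpa using PySem.List.sorted_pairwise Ys id
  rw [mergeCountB_eq ((PySem.List.sorted Xs id).reverse.length + (PySem.List.sorted Ys id).reverse.length)
      _ _ 0 (le_refl _) hpwX hpwY]
  rw [countSolutions_eq_matchSum a b c d, ← hXs, ← hYs]
  have hcnt : ∀ y : Int, ((PySem.List.sorted Xs id).reverse.count y : Int) = (Xs.count y : Int) := by
    intro y
    exact congrArg (fun n : Nat => (n : Int)) (hpermX.count_eq y)
  have hms : matchSum (PySem.List.sorted Xs id).reverse (PySem.List.sorted Ys id).reverse = matchSum Xs Ys := by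
    unfold matchSum
    rw [List.map_congr_left (fun y _ => hcnt y)]
    exact List.Perm.sum_eq (hpermY.map _)
  rw [hms]; ring
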